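-- pv_equiv track=rewrite | github.com/82surf/problem-solving | BOJ/14916/s1.py | solution
-- ===== SOURCE A (Python) =====
-- def solution(n):
--     coin_5 = n // 5
--     n -= coin_5 * 5
--     coin_2 = n // 2
--     n -= coin_2 * 2
--     while n:
--         coin_5 -= 1
--         if coin_5 < 0:
--             return -1
--         n += 5
--         extra_2 = n // 2
--         coin_2 += extra_2
--         n -= extra_2 * 2
--     return coin_5 + coin_2
-- ===== SOURCE B (Python) =====
-- def solution(n):
--     q, r = divmod(n, 5)
--     if r % 2 == 0:
--         return q + r // 2
--     if q < 1:
--         return -1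
--     return q + (r + 3) // 2
-- ===== Notes on version B (the rewrite author's own statement) =====
-- stated objective: simpler
-- what changed: Replaced the greedy-then-repair while loop by a closed-form parity formula on n divmod 5 (even remainder: q + r//2; odd remainder: -1 if q < 1 else q + (r+3)//2).
import Mathlib
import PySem

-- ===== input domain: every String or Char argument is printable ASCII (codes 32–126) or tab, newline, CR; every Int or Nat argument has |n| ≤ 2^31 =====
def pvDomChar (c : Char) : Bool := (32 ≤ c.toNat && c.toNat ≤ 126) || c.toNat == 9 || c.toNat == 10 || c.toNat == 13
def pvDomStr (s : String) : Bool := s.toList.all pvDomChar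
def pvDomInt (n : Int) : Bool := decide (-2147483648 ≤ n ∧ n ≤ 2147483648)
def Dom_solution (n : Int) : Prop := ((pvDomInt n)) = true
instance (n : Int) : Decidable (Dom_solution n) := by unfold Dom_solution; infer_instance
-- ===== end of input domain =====

-- B replaces A's greedy-then-repair while loop by a closed-form parity formula (objective: simpler).

-- ===== PORT A =====
-- the 'while n:' loop; terminates because coin5 strictly decreases and -1 is returned once it goes negative
def solutionLoop (coin5 coin2 n : Int) : Int :=
  if n ≠ 0 then
    if coin5 - 1 < 0 then -1
    else
      let n1 := n + 5
      let e2 := PySem.Int.floordiv n1 2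
      solutionLoop (coin5 - 1) (coin2 + e2) (n1 - e2 * 2)
  else coin5 + coin2
termination_by coin5.toNat
decreasing_by omega

def solution (n : Int) : Int :=
  let coin5 := PySem.Int.floordiv n 5
  let n1 := n - coin5 * 5
  let coin2 := PySem.Int.floordiv n1 2
  solutionLoop coin5 coin2 (n1 - coin2 * 2)

-- ===== PORT B =====
def solution_alt (n : Int) : Int :=
  let q := PySem.Int.floordiv n 5
  let r := PySem.Int.mod n 5
  if PySem.Int.mod r 2 = 0 then q + PySem.Int.floordiv r 2
  else if q < 1 then -1
  else q + PySem.Int.floordiv (r + 3) 2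

-- ===== PRECONDITION & SPEC =====
def Spec_solution (n : Int) (out : Int) : Prop := out = solution_alt n
instance (n : Int) (out : Int) : Decidable (Spec_solution n out) := by unfold Spec_solution; infer_instance

-- ===== CLAIM (what is proved, stated in full; the proofs are below) =====
def Claim_equal_solution : Prop := ∀ (n : Int), Dom_solution n → Spec_solution n (solution n)

-- ===== LEMMAS AND PROOFS =====
theorem solutionLoop_zero (c5 c2 : Int) : solutionLoop c5 c2 0 = c5 + c2 := by
  unfold solutionLoop; simp

theorem solutionLoop_one (c5 c2 : Int) :
    solutionLoop c5 c2 1 = if c5 - 1 < 0 then -1 else c5 + c2 + 2 := by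
  unfold solutionLoop
  have h6 : PySem.Int.floordiv (1 + 5) 2 = 3 := by decide
  simp only [h6]
  split_ifs with h1 h2 <;> first
    | rfl
    | (rw [show (1 : Int) + 5 - 3 * 2 = 0 by norm_num, solutionLoop_zero]; ring)
    | omega

-- ===== VERDICT (by name: the statement is the Claim_ definition above) =====
theorem solution_spec : Claim_equal_solution := by
  intro n _
  unfold Spec_solution solution solution_alt
  dsimp only
  rw [PySem.Int.floordiv_eq_ediv_of_pos (a := n) (by norm_num)]
  have hr : n - n / 5 * 5 = n % 5 := by omega
  rw [hr]
  rw [PySem.Int.floordiv_eq_ediv_of_pos (a := n % 5) (by norm_num)]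
  rw [PySem.Int.mod_eq_emod_of_pos (a := n) (by norm_num)]
  rw [PySem.Int.mod_eq_emod_of_pos (a := n % 5) (by norm_num)]
  have hrb : 0 ≤ n % 5 ∧ n % 5 < 5 := ⟨Int.emod_nonneg n (by norm_num), Int.emod_lt_of_pos n (by norm_num)⟩
  have hpar : n % 5 - n % 5 / 2 * 2 = n % 5 % 2 := by omega
  rw [hpar]
  rcases Int.emod_two_eq_zero_or_one (n % 5) with h | h
  · rw [h, solutionLoop_zero]; simp
  · rw [h, solutionLoop_one,
      PySem.Int.floordiv_eq_ediv_of_pos (a := n % 5 + 3) (by norm_num)]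
    split_ifs <;> omega
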